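-- pv_equiv track=rewrite | github.com/NathanKe/AdventPython | 2023/07_answer.py | best_use_of_joker
-- ===== SOURCE A (Python) =====
-- from collections import Counter as co
--
-- def highest_most_common_non_joker(i_hand):
--     non_joker = [card for card in i_hand if card != 11]
--     hand_counter = co(non_joker)
--     most_common_count = hand_counter.most_common()[0][1]
--     equally_most_common = [tu for tu in hand_counter.items() if tu[1] == most_common_count]
--     highest_most_common = sorted([tu[0] for tu in equally_most_common])[-1]
--     return highest_most_common
--
-- def best_use_of_joker(i_hand):
--     if i_hand == [11, 11, 11, 11, 11]:
--         return [14, 14, 14, 14, 14]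
--     else:
--         target = highest_most_common_non_joker(i_hand)
--         new_hand = []
--         for card in i_hand:
--             if card == 11:
--                 new_hand.append(target)
--             else:
--                 new_hand.append(card)
--     return new_hand
-- ===== SOURCE B (Python) =====
-- def best_use_of_joker(i_hand):
--     # Sort the non-jokers ascending and pick the target with one run-length scan:
--     # the last run with maximal length wins, i.e. ties go to the higher card.
--     if i_hand == [11, 11, 11, 11, 11]:
--         return [14, 14, 14, 14, 14]
--     rest = sorted(c for c in i_hand if c != 11)
--     best = run = 0
--     prev = target = None
--     for c in rest:
--         run = run + 1 if c == prev else 1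
--         prev = c
--         if run >= best:
--             best, target = run, c
--     return [target if x == 11 else x for x in i_hand]
-- ===== Notes on version B (the rewrite author's own statement) =====
-- stated objective: alternative
-- what changed: Replaces Counter + most_common + tie filter + sort-and-take-last with sorting the non-jokers ascending and a single run-length scan that keeps the last longest run (ties toward the higher card).
import Mathlib
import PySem

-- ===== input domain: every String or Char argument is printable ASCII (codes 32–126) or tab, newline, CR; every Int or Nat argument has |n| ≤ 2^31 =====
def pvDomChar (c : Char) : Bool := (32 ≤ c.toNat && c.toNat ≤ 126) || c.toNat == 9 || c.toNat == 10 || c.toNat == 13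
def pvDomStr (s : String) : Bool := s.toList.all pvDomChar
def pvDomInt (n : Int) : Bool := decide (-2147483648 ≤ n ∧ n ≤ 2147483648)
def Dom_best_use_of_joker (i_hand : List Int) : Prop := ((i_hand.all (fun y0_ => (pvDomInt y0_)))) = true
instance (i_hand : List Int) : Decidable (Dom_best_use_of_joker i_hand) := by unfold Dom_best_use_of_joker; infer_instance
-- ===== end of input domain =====

-- B replaces Counter/most_common/tie-filter/sort by sorting the non-jokers and one run-length scan (alternative decomposition, same cost).

-- ===== PORT A =====
-- most_common() = items sorted by count descending (stable); [0] / [-1] via pyGet? (none = IndexError)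
def highest_most_common_non_joker (i_hand : List Int) : Option Int :=
  let non_joker := i_hand.filter (fun card => card ≠ 11)
  let hand_counter := PySem.Dict.counter non_joker
  match PySem.List.pyGet? (PySem.List.sorted hand_counter.items (fun tu => tu.2) true) 0 with
  | none => none   -- Python raises IndexError here; excluded by Pre_
  | some top =>
    let most_common_count := top.2
    let equally_most_common := hand_counter.items.filter (fun tu => tu.2 == most_common_count)
    PySem.List.pyGet? (PySem.List.sorted (equally_most_common.map (fun tu => tu.1)) (fun x => x) false) (-1)

def best_use_of_joker (i_hand : List Int) : List Int :=
  if i_hand = [11, 11, 11, 11, 11] then [14, 14, 14, 14, 14]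
  else
    match highest_most_common_non_joker i_hand with
    | none => []   -- Python raises here; excluded by Pre_
    | some target =>
      i_hand.foldl (fun new_hand card =>
        if card = 11 then new_hand ++ [target] else new_hand ++ [card]) []

-- ===== PORT B =====
-- state = (best, run, prev, target), exactly Source B's loop over the ascending-sorted non-jokers
def pvScanStep (st : Int × Int × Option Int × Option Int) (c : Int) : Int × Int × Option Int × Option Int :=
  let run := if some c = st.2.2.1 then st.2.1 + 1 else 1
  if st.1 ≤ run then (run, run, some c, some c) else (st.1, run, some c, st.2.2.2)

def best_use_of_joker_alt (i_hand : List Int) : List Int :=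
  if i_hand = [11, 11, 11, 11, 11] then [14, 14, 14, 14, 14]
  else
    let rest := PySem.List.sorted (i_hand.filter (fun c => c ≠ 11)) (fun x => x) false
    let st := rest.foldl pvScanStep (0, 0, none, none)
    i_hand.map (fun x => if x = 11 then st.2.2.2.getD 0 else x)

-- ===== PRECONDITION & SPEC =====
-- Pre_ excludes hands whose cards are all jokers other than exactly [11,11,11,11,11]: there A raises
-- IndexError (Counter of the empty list has no most_common()[0]).
def Pre_best_use_of_joker (i_hand : List Int) : Prop :=
  i_hand = [11, 11, 11, 11, 11] ∨ i_hand.any (fun c => c ≠ 11) = true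
instance (i_hand : List Int) : Decidable (Pre_best_use_of_joker i_hand) := by
  unfold Pre_best_use_of_joker; infer_instance
def pvWitness_best_use_of_joker : List Int := [3, 11, 5, 5, 3]

def Spec_best_use_of_joker (i_hand : List Int) (out : List Int) : Prop := out = best_use_of_joker_alt i_hand
instance (i_hand : List Int) (out : List Int) : Decidable (Spec_best_use_of_joker i_hand out) := by unfold Spec_best_use_of_joker; infer_instance

-- ===== CLAIM (what is proved, stated in full; the proofs are below) =====
def Claim_equal_best_use_of_joker : Prop := ∀ (i_hand : List Int), Dom_best_use_of_joker i_hand → Pre_best_use_of_joker i_hand → Spec_best_use_of_joker i_hand (best_use_of_joker i_hand)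

-- ===== LEMMAS AND PROOFS =====

-- the last element of a ≤-sorted list is maximal
theorem pv_last_max (l : List Int) (h : l.Pairwise (· ≤ ·)) (hne : l ≠ []) :
    ∀ w ∈ l, w ≤ l.getLast hne := by
  induction l with
  | nil => cases hne rfl
  | cons a t ih =>
    rcases List.pairwise_cons.mp h with ⟨ha, ht⟩
    intro w hw
    replace ih := fun hp hne => ih hp hne
    rcases List.mem_cons.mp hw with rfl | hwt
    · rcases t with _ | ⟨b, u⟩
      · simp [List.getLast]
      · have hb : b :: u ≠ [] := by simp
        calc w ≤ (b :: u).getLast hb := le_trans (ha b (by simp)) (ih ht hb b (by simp))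
        _ = (w :: b :: u).getLast hne := (List.getLast_cons hb).symm
    · rcases t with _ | ⟨b, u⟩
      · cases hwt
      · have hb : b :: u ≠ [] := by simp
        calc w ≤ (b :: u).getLast hb := ih ht hb w hwt
        _ = (a :: b :: u).getLast hne := (List.getLast_cons hb).symm

-- xs[-1] is the last element
theorem pv_pyGet_neg_one (l : List Int) (h : l ≠ []) :
    PySem.List.pyGet? l (-1) = some (l.getLast h) := by
  have hl : 1 ≤ l.length := List.length_pos_iff.mpr h
  simp only [PySem.List.pyGet?, PySem.List.pyIdx?]
  norm_num [hl]
  rw [List.getElem?_eq_getElem (by omega)]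
  simp [List.getLast_eq_getElem]

-- B's scan over a ≤-sorted nonempty list ends with target = the (count, value)-lexicographic argmax
theorem pv_scan_spec (s : List Int) (hs : s.Pairwise (· ≤ ·)) (hne : s ≠ []) :
    ∃ best run m t, s.foldl pvScanStep (0, 0, none, none) = (best, run, some m, some t) ∧
      m ∈ s ∧ (∀ w ∈ s, w ≤ m) ∧ run = (s.count m : Int) ∧
      t ∈ s ∧ (s.count t : Int) = best ∧
      (∀ w ∈ s, (s.count w : Int) < best ∨ ((s.count w : Int) = best ∧ w ≤ t)) := by
  induction s using List.reverseRecOn with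
  | nil => cases hne rfl
  | append_singleton p c ih =>
    rcases List.pairwise_append.mp hs with ⟨hp, -, hpc⟩
    have hpc' : ∀ a ∈ p, a ≤ c := fun a ha => hpc a ha c (by simp)
    have hcc : (p ++ [c]).count c = p.count c + 1 := by simp [List.count_append]
    have hcw : ∀ w : Int, w ≠ c → (p ++ [c]).count w = p.count w := by
      intro w hw
      simp [List.count_append, List.count_singleton]
      exact fun h => hw h.symm
    have hmemc : c ∈ p ++ [c] := by simp
    have hmemp : ∀ w : Int, w ∈ p ++ [c] → w ≠ c → w ∈ p := by
      intro w hw hwc; rcases List.mem_append.mp hw with h | h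
      · exact h
      · simp at h; exact absurd h hwc
    rcases eq_or_ne p [] with rfl | hpne
    · refine ⟨1, 1, c, c, ?_, by simp, by simp, by simp, by simp, by simp, by simp⟩
      simp [pvScanStep]
    · rcases ih hp hpne with ⟨best, run, m, t, hfold, hm, hmax, hrun, ht, hcnt, harg⟩
      have htm : t ∈ p ++ [c] := List.mem_append.mpr (Or.inl ht)
      rw [List.foldl_append, hfold]
      have hmaxc : ∀ w ∈ p ++ [c], w ≤ c := by
        intro w hw
        rcases List.mem_append.mp hw with h | h
        · exact hpc' w h
        · simp at h; omega
      by_cases hcm : c = m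
      · have hrun' : ((p ++ [c]).count c : Int) = run + 1 := by
          rw [hcc]; push_cast; rw [hcm, ← hrun]
        by_cases hbr : best ≤ run + 1
        · refine ⟨run + 1, run + 1, c, c, ?_, hmemc, hmaxc, hrun'.symm, hmemc, hrun', ?_⟩
          · simp [pvScanStep, hcm, hbr]
          · intro w hw
            rcases eq_or_ne w c with rfl | hwc
            · right; exact ⟨hrun', le_refl _⟩
            · have hwp := hmemp w hw hwc
              have he : ((p ++ [c]).count w : Int) = (p.count w : Int) := by rw [hcw w hwc]
              rcases harg w hwp with h | ⟨h, h'⟩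
              · left; omega
              · rcases eq_or_ne ((p.count w : Int)) (run + 1) with he2 | hne2
                · right; exact ⟨by omega, hpc' w hwp⟩
                · left; omega
        · have htc : t ≠ c := by
            intro he
            have : ((p).count t : Int) = run := by rw [he, hcm] at hcnt ⊢; omega
            omega
          refine ⟨best, run + 1, c, t, ?_, hmemc, hmaxc, hrun'.symm, htm, ?_, ?_⟩
          · simp [pvScanStep, hcm, hbr]
          · rw [hcw t htc]; exact hcnt
          · intro w hw
            rcases eq_or_ne w c with rfl | hwc
            · left; omega
            · have hwp := hmemp w hw hwc
              have he : ((p ++ [c]).count w : Int) = (p.count w : Int) := by rw [hcw w hwc]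
              rcases harg w hwp with h | ⟨h, h'⟩
              · left; omega
              · right; exact ⟨by omega, h'⟩
      · have hcp : c ∉ p := fun hcpmem => hcm ((le_antisymm (hpc' m hm) (hmax c hcpmem)).symm)
        have hc1 : ((p ++ [c]).count c : Int) = 1 := by
          rw [hcc, List.count_eq_zero_of_not_mem hcp]; norm_num
        have hcm' : ¬ (some c = some m) := by simp [hcm]
        by_cases hbr : best ≤ 1
        · refine ⟨1, 1, c, c, ?_, hmemc, hmaxc, hc1.symm, hmemc, hc1, ?_⟩
          · simp [pvScanStep, hcm', hbr]
          · intro w hw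
            rcases eq_or_ne w c with rfl | hwc
            · right; exact ⟨hc1, le_refl _⟩
            · have hwp := hmemp w hw hwc
              have he : ((p ++ [c]).count w : Int) = (p.count w : Int) := by rw [hcw w hwc]
              have hle : (p.count w : Int) ≤ best := by
                rcases harg w hwp with h | ⟨h, h'⟩ <;> omega
              rcases eq_or_ne ((p.count w : Int)) 1 with he2 | hne2
              · right; exact ⟨by omega, hpc' w hwp⟩
              · have hpos : 0 < p.count w := List.count_pos_iff.mpr hwp
                left; omega
        · have htc : t ≠ c := fun he => hcp (he ▸ ht)
          refine ⟨best, 1, c, t, ?_, hmemc, hmaxc, hc1.symm, htm, ?_, ?_⟩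
          · simp [pvScanStep, hcm', hbr]
          · rw [hcw t htc]; exact hcnt
          · intro w hw
            rcases eq_or_ne w c with rfl | hwc
            · left; omega
            · have hwp := hmemp w hw hwc
              have he : ((p ++ [c]).count w : Int) = (p.count w : Int) := by rw [hcw w hwc]
              rcases harg w hwp with h | ⟨h, h'⟩
              · left; omega
              · right; exact ⟨by omega, h'⟩

-- the (count, value)-lexicographic argmax of a list is unique
theorem pv_argmax_unique (s : List Int) (b1 b2 t1 t2 : Int)
    (h1 : t1 ∈ s) (c1 : (s.count t1 : Int) = b1)
    (m1 : ∀ w ∈ s, (s.count w : Int) ≤ b1) (x1 : ∀ w ∈ s, (s.count w : Int) = b1 → w ≤ t1)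
    (h2 : t2 ∈ s) (c2 : (s.count t2 : Int) = b2)
    (m2 : ∀ w ∈ s, (s.count w : Int) ≤ b2) (x2 : ∀ w ∈ s, (s.count w : Int) = b2 → w ≤ t2) :
    t1 = t2 := by
  have hb : b1 = b2 := le_antisymm (c1 ▸ m2 t1 h1) (c2 ▸ m1 t2 h2)
  exact le_antisymm (x2 t1 h1 (by omega)) (x1 t2 h2 (by omega))

-- A's helper returns the same argmax
theorem pv_A_spec (i_hand : List Int) (hne : i_hand.filter (fun card => card ≠ 11) ≠ []) :
    ∃ tA, highest_most_common_non_joker i_hand = some tA ∧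
      tA ∈ i_hand.filter (fun card => card ≠ 11) ∧
      (∀ w ∈ i_hand.filter (fun card => card ≠ 11),
        ((i_hand.filter (fun card => card ≠ 11)).count w : Int) ≤ ((i_hand.filter (fun card => card ≠ 11)).count tA : Int)) ∧
      (∀ w ∈ i_hand.filter (fun card => card ≠ 11),
        (i_hand.filter (fun card => card ≠ 11)).count w = (i_hand.filter (fun card => card ≠ 11)).count tA → w ≤ tA) := by
  set nj := i_hand.filter (fun card => card ≠ 11) with hnj
  have hitems : (PySem.Dict.counter nj).items
      = (PySem.Set.ofList nj).map (fun k => (k, (List.count k nj : Int))) :=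
    PySem.Dict.items_counter nj
  have hsetne : PySem.Set.ofList nj ≠ [] := by
    intro h0
    rcases List.exists_mem_of_ne_nil nj hne with ⟨x, hx⟩
    have := (PySem.Set.mem_ofList nj x).mpr hx
    rw [h0] at this; cases this
  have hitemsne : (PySem.Dict.counter nj).items ≠ [] := by
    rw [hitems]; simpa using hsetne
  -- head of most_common
  rcases hsm : PySem.List.sorted (PySem.Dict.counter nj).items (fun tu => tu.2) true with _ | ⟨top, tl⟩
  · exact absurd ((PySem.List.sorted_eq_nil_iff _ _ _).mp hsm) hitemsne
  have htopmem : top ∈ (PySem.Dict.counter nj).items := by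
    have : top ∈ PySem.List.sorted (PySem.Dict.counter nj).items (fun tu => tu.2) true := by
      rw [hsm]; simp
    exact (PySem.List.mem_sorted _ _ _ _).mp this
  have htopmax : ∀ y ∈ (PySem.Dict.counter nj).items, y.2 ≤ top.2 :=
    PySem.List.key_head_sorted_rev_ge _ _ hsm
  -- counts vs top.2
  have hcmax : ∀ k ∈ nj, (List.count k nj : Int) ≤ top.2 := by
    intro k hk
    have : (k, (List.count k nj : Int)) ∈ (PySem.Dict.counter nj).items := by
      rw [hitems]
      exact List.mem_map.mpr ⟨k, (PySem.Set.mem_ofList nj k).mpr hk, rfl⟩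
    exact htopmax _ this
  obtain ⟨k0, hk0set, hk0⟩ := by
    rw [hitems] at htopmem; exact List.mem_map.mp htopmem
  have hk0nj : k0 ∈ nj := (PySem.Set.mem_ofList nj k0).mp hk0set
  have htop2 : top.2 = (List.count k0 nj : Int) := by rw [← hk0]
  -- keys of the ties
  have hkeys : ((PySem.Dict.counter nj).items.filter (fun tu => tu.2 == top.2)).map (fun tu => tu.1)
      = (PySem.Set.ofList nj).filter (fun k => (List.count k nj : Int) == top.2) := by
    rw [hitems, List.filter_map, List.map_map]
    simp [Function.comp_def]
  set K : List Int := (PySem.Set.ofList nj).filter (fun k => (List.count k nj : Int) == top.2) with hK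
  have hk0K : k0 ∈ K := by
    rw [hK]
    refine List.mem_filter.mpr ⟨hk0set, ?_⟩
    simp [htop2]
  have hKne : K ≠ [] := fun h0 => by rw [h0] at hk0K; cases hk0K
  have hsKne : PySem.List.sorted K (fun x => x) false ≠ [] := by
    intro h0
    exact hKne ((PySem.List.sorted_eq_nil_iff _ _ _).mp h0)
  set tA := (PySem.List.sorted K (fun x => x) false).getLast hsKne with htA
  have htAK : tA ∈ K := by
    have : tA ∈ PySem.List.sorted K (fun x => x) false := List.getLast_mem hsKne
    exact (PySem.List.mem_sorted _ _ _ _).mp this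
  have htAmem : tA ∈ nj := by
    rw [hK] at htAK
    exact (PySem.Set.mem_ofList nj tA).mp (List.mem_filter.mp htAK).1
  have htAcnt : (List.count tA nj : Int) = top.2 := by
    rw [hK] at htAK
    have := (List.mem_filter.mp htAK).2
    simpa using this
  have hKmax : ∀ w ∈ K, w ≤ tA := by
    intro w hw
    have hw' : w ∈ PySem.List.sorted K (fun x => x) false := (PySem.List.mem_sorted _ _ _ _).mpr hw
    have hpw : (PySem.List.sorted K (fun x => x) false).Pairwise (· ≤ ·) := by
      have := PySem.List.sorted_pairwise K (fun x => x)
      simpa using this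
    exact pv_last_max _ hpw hsKne w hw'
  have hval : highest_most_common_non_joker i_hand = some tA := by
    simp only [highest_most_common_non_joker]
    rw [← hnj, hsm]
    have hget0 : PySem.List.pyGet? (top :: tl) (0 : Int) = some top := by
      simp [PySem.List.pyGet?, PySem.List.pyIdx?]
    rw [hget0]
    show PySem.List.pyGet? (PySem.List.sorted
        (((PySem.Dict.counter nj).items.filter (fun tu => tu.2 == top.2)).map (fun tu => tu.1))
        (fun x => x) false) (-1) = some tA
    rw [hkeys, pv_pyGet_neg_one _ hsKne, ← htA]
  refine ⟨tA, hval, htAmem, ?_, ?_⟩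
  · intro w hw
    rw [htAcnt]
    exact hcmax w hw
  · intro w hw hcw
    apply hKmax
    rw [hK]
    refine List.mem_filter.mpr ⟨(PySem.Set.mem_ofList nj w).mpr hw, ?_⟩
    simp [hcw, htAcnt]

-- ===== VERDICT (by name: the statement is the Claim_ definition above) =====
theorem best_use_of_joker_spec : Claim_equal_best_use_of_joker := by
  intro i_hand _ hpre
  unfold Spec_best_use_of_joker
  by_cases h5 : i_hand = [11, 11, 11, 11, 11]
  · simp [best_use_of_joker, best_use_of_joker_alt, h5]
  · have hne : i_hand.filter (fun card => card ≠ 11) ≠ [] := by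
      rcases hpre with h | hany
      · exact absurd h h5
      · obtain ⟨c, hc, hc11⟩ := List.any_eq_true.mp hany
        rw [decide_eq_true_iff] at hc11
        intro hf
        have : c ∈ i_hand.filter (fun card => card ≠ 11) := by
          simp [List.mem_filter, hc, hc11]
        rw [hf] at this; cases this
    rcases pv_A_spec i_hand hne with ⟨tA, hval, htAmem, htAmax, htAtie⟩
    have hpair : (PySem.List.sorted (i_hand.filter (fun card => card ≠ 11)) (fun x => x) false).Pairwise (· ≤ ·) := by
      have := PySem.List.sorted_pairwise (i_hand.filter (fun card => card ≠ 11)) (fun x => x)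
      simpa using this
    have hsne : PySem.List.sorted (i_hand.filter (fun card => card ≠ 11)) (fun x => x) false ≠ [] := by
      intro h0; exact hne ((PySem.List.sorted_eq_nil_iff _ _ _).mp h0)
    rcases pv_scan_spec _ hpair hsne with ⟨best, run, m, t, hfold, hm, hmax, hrun, ht, hcnt, harg⟩
    have hperm := PySem.List.sorted_perm (i_hand.filter (fun card => card ≠ 11)) (fun x => x) false
    have hcount : ∀ w : Int, (PySem.List.sorted (i_hand.filter (fun card => card ≠ 11)) (fun x => x) false).count w
        = (i_hand.filter (fun card => card ≠ 11)).count w := fun w => hperm.count_eq w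
    have ht' : t ∈ i_hand.filter (fun card => card ≠ 11) := hperm.mem_iff.mp ht
    have hcnt' : ((i_hand.filter (fun card => card ≠ 11)).count t : Int) = best := by
      rw [← hcount]; exact hcnt
    have hmax' : ∀ w ∈ i_hand.filter (fun card => card ≠ 11),
        ((i_hand.filter (fun card => card ≠ 11)).count w : Int) ≤ best := by
      intro w hw
      have hw' := hperm.mem_iff.mpr hw
      rcases harg w hw' with h | ⟨h, -⟩ <;> rw [← hcount] <;> omega
    have htie' : ∀ w ∈ i_hand.filter (fun card => card ≠ 11),
        ((i_hand.filter (fun card => card ≠ 11)).count w : Int) = best → w ≤ t := by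
      intro w hw hcw
      have hw' := hperm.mem_iff.mpr hw
      rcases harg w hw' with h | ⟨-, h'⟩
      · rw [hcount] at h; omega
      · exact h'
    have teq : tA = t := by
      refine pv_argmax_unique (i_hand.filter (fun card => card ≠ 11))
        ((i_hand.filter (fun card => card ≠ 11)).count tA : Int) best tA t
        htAmem rfl htAmax ?_ ht' hcnt' hmax' htie'
      intro w hw hcw
      exact htAtie w hw (by exact_mod_cast hcw)
    have hA : best_use_of_joker i_hand
        = i_hand.map (fun card => if card = 11 then tA else card) := by
      simp only [best_use_of_joker, if_neg h5, hval]
      have hfn : (fun (nh : List Int) card => if card = 11 then nh ++ [tA] else nh ++ [card])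
          = fun nh card => nh ++ [if card = 11 then tA else card] := by
        funext nh card; split_ifs <;> rfl
      rw [hfn, PySem.List.foldl_append_singleton_eq_map]
      simp
    have hB : best_use_of_joker_alt i_hand
        = i_hand.map (fun x => if x = 11 then t else x) := by
      simp only [best_use_of_joker_alt, if_neg h5]
      rw [hfold]
      simp
    rw [hA, hB, teq]
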